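-- pv_equiv track=rewrite | github.com/athena272/king-python | TheHuxleyCodigos/Questionario08/066_RisadaDigital.py | soVogal
-- ===== SOURCE A (Python) =====
-- def soVogal(textoRisada):
--     status = True
--     letraAnterior = textoRisada[0]
--     for letra in textoRisada:
--         if(letra not in 'aeiou' or letraAnterior != letra):
--             status = False
--             break
--         letraAnterior = letra
--     return status
-- ===== SOURCE B (Python) =====
-- def soVogal(textoRisada):
--     # simpler: no loop/state -- index once (same IndexError on empty input),
--     # then one membership test plus a distinct-character count.
--     return textoRisada[0] in 'aeiou' and len(set(textoRisada)) == 1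
-- ===== Notes on version B (the rewrite author's own statement) =====
-- stated objective: simpler
-- what changed: Replaces the explicit previous-letter scan with break by a single expression: the first character's vowel test short-circuited with a distinct-character count via set(), so no loop, branch or maintained state remains.
import Mathlib
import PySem

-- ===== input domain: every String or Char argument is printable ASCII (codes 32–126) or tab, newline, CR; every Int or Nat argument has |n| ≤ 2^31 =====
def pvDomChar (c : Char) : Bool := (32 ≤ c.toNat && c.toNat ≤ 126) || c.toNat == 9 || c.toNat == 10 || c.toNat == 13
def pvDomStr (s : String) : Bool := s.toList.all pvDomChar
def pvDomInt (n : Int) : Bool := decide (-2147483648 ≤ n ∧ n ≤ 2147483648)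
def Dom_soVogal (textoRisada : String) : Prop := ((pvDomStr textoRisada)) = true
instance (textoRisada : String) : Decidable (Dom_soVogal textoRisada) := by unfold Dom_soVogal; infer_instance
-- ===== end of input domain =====

-- B replaces A's previous-letter scan with one vowel test plus a distinct-character count (simpler, no loop state).

-- ===== PORT A =====
-- the for-loop with `break`: returns false as soon as the condition fires
def soVogalLoop (status : Bool) (letraAnterior : Char) : List Char → Bool
  | [] => status
  | letra :: rest =>
    if ¬ ("aeiou".toList.contains letra) ∨ letraAnterior ≠ letra then false
    else soVogalLoop status letra rest

def soVogal (textoRisada : String) : Bool :=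
  match PySem.List.pyGet? textoRisada.toList 0 with
  | none => true  -- Python raises IndexError here (empty input); excluded by Pre_soVogal
  | some letraAnterior => soVogalLoop true letraAnterior textoRisada.toList

-- ===== PORT B =====
def soVogal_alt (textoRisada : String) : Bool :=
  match PySem.List.pyGet? textoRisada.toList 0 with
  | none => true  -- Python raises IndexError here (empty input); excluded by Pre_soVogal
  | some c =>
    "aeiou".toList.contains c && (PySem.Set.len (PySem.Set.ofList textoRisada.toList) == 1)

-- ===== PRECONDITION & SPEC =====
-- Pre_ excludes only the empty string, on which A (and B) raise IndexError at textoRisada[0].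
def Pre_soVogal (textoRisada : String) : Prop := textoRisada.toList ≠ []
instance (textoRisada : String) : Decidable (Pre_soVogal textoRisada) := by unfold Pre_soVogal; infer_instance
def pvWitness_soVogal : String := "aa"

def Spec_soVogal (textoRisada : String) (out : Bool) : Prop := out = soVogal_alt textoRisada
instance (textoRisada : String) (out : Bool) : Decidable (Spec_soVogal textoRisada out) := by unfold Spec_soVogal; infer_instance

-- ===== CLAIM (what is proved, stated in full; the proofs are below) =====
def Claim_equal_soVogal : Prop := ∀ (textoRisada : String), Dom_soVogal textoRisada → Pre_soVogal textoRisada → Spec_soVogal textoRisada (soVogal textoRisada)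

-- ===== LEMMAS AND PROOFS =====

-- A's loop computes: every letter is a vowel and equals the running previous letter
theorem soVogalLoop_all (l : List Char) : ∀ prev : Char,
    soVogalLoop true prev l = l.all (fun x => "aeiou".toList.contains x && prev == x) := by
  induction l with
  | nil => intro prev; rfl
  | cons x rest ih =>
    intro prev
    simp only [soVogalLoop, List.all_cons]
    split_ifs with h
    · rcases h with h | h
      · have hx : ("aeiou".toList.contains x) = false := Bool.not_eq_true _ ▸ eq_false_of_ne_true h
        rw [hx]; simp
      · have hx : (prev == x) = false := beq_eq_false_iff_ne.mpr h
        rw [hx]; simp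
    · push Not at h
      obtain ⟨hv, he⟩ := h
      subst he
      rw [hv, ih]
      simp

-- foldl over Set.add never shrinks the accumulator
theorem foldl_add_length_le (l : List Char) : ∀ acc : List Char,
    acc.length ≤ (l.foldl PySem.Set.add acc).length := by
  induction l with
  | nil => intro acc; simp
  | cons x rest ih =>
    intro acc
    refine le_trans ?_ (ih (PySem.Set.add acc x))
    by_cases h : PySem.Set.contains acc x = true
    · have : PySem.Set.add acc x = acc := by rw [PySem.Set.add, if_pos h]
      rw [this]
    · have : PySem.Set.add acc x = acc ++ [x] := by rw [PySem.Set.add, if_neg h]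
      rw [this]; simp

-- the distinct-character count of c::rest is 1 iff every element of rest equals c
theorem set_len_one (rest : List Char) : ∀ c : Char,
    ((rest.foldl PySem.Set.add [c]).length == 1) = rest.all (fun x => x == c) := by
  induction rest with
  | nil => intro c; rfl
  | cons x rest ih =>
    intro c
    by_cases he : x = c
    · subst he
      have hadd : PySem.Set.add [x] x = [x] := by
        rw [PySem.Set.add, if_pos]; simp
      rw [List.foldl_cons, hadd, ih, List.all_cons]
      simp
    · have hadd : PySem.Set.add [c] x = [c, x] := by
        rw [PySem.Set.add, if_neg]
        · rfl
        · simpa using he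
      have hlen := foldl_add_length_le rest [c, x]
      have hne : ((rest.foldl PySem.Set.add [c, x]).length == 1) = false := by
        rw [beq_eq_false_iff_ne]
        simp only [List.length_cons, List.length_nil] at hlen
        omega
      have hx : (x == c) = false := beq_eq_false_iff_ne.mpr he
      rw [List.foldl_cons, hadd, hne, List.all_cons, hx]
      simp

-- when the head is a vowel, the two "all" bodies agree
theorem all_congr_vowel (rest : List Char) (c : Char)
    (hc : ("aeiou".toList.contains c) = true) :
    rest.all (fun x => "aeiou".toList.contains x && c == x) = rest.all (fun x => x == c) := by
  induction rest with
  | nil => rfl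
  | cons x rest ih =>
    rw [List.all_cons, List.all_cons, ih]
    by_cases he : x = c
    · subst he
      rw [hc]
      simp
    · have h1 : (c == x) = false := beq_eq_false_iff_ne.mpr (Ne.symm he)
      have h2 : (x == c) = false := beq_eq_false_iff_ne.mpr he
      rw [h1, h2]
      simp

-- ===== VERDICT (by name: the statement is the Claim_ definition above) =====
theorem soVogal_spec : Claim_equal_soVogal := by
  intro s _ hpre
  unfold Spec_soVogal soVogal soVogal_alt
  cases hl : s.toList with
  | nil => exact absurd hl hpre
  | cons c rest =>
    rw [PySem.List.pyGet?_zero_cons]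
    show soVogalLoop true c (c :: rest)
       = ("aeiou".toList.contains c && (PySem.Set.len (PySem.Set.ofList (c :: rest)) == 1))
    have hset : PySem.Set.ofList (c :: rest) = rest.foldl PySem.Set.add [c] := rfl
    have hlen : (PySem.Set.len (rest.foldl PySem.Set.add [c]) == (1 : Int))
              = ((rest.foldl PySem.Set.add [c]).length == 1) := by
      by_cases h : (rest.foldl PySem.Set.add [c]).length = 1
      · simp [PySem.Set.len, h]
      · simp [PySem.Set.len, h]
    rw [soVogalLoop_all, hset, hlen, set_len_one, List.all_cons]
    by_cases hc : ("aeiou".toList.contains c) = true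
    · rw [hc, all_congr_vowel rest c hc]
      simp
    · have hc' : ("aeiou".toList.contains c) = false := Bool.not_eq_true _ ▸ eq_false_of_ne_true hc
      rw [hc']
      simp
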